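-- pv_equiv track=rewrite | github.com/grassedprogrammer/betterstuff | better floats and more.py | strfloat_strs
-- ===== SOURCE A (Python) =====
-- def strfloat_strs(strfloat):
--     lstr = ""
--     lstr2 = lstr
--     lbool = False
--     for i in strfloat:
--         if i == ".":
--             lbool = True
--         elif lbool == False:
--             lstr = lstr + i
--         else:
--             lstr2 = lstr2 + i
--     return lstr, lstr2
-- ===== SOURCE B (Python) =====
-- def strfloat_strs(strfloat):
--     head, _, tail = strfloat.partition(".")
--     return head, tail.replace(".", "")
-- ===== Notes on version B (the rewrite author's own statement) =====
-- stated objective: faster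
-- what changed: Replaces the character-by-character loop with a boolean flag by str.partition at the first dot followed by removing remaining dots from the tail with str.replace.
import Mathlib
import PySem

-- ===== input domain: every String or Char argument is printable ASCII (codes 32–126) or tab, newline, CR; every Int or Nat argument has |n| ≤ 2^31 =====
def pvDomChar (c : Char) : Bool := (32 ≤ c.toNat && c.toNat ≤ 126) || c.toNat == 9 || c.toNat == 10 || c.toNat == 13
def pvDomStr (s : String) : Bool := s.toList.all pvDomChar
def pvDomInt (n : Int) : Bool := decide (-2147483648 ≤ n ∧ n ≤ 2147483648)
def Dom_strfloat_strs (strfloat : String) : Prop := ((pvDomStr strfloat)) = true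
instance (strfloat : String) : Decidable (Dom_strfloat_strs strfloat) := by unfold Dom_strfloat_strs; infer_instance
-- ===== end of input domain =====

-- B replaces A's char-by-char loop with a flag by partition-at-first-dot then stripping remaining dots (idiomatic).

-- ===== PORT A =====
-- loop step: i == "." sets the flag; before the flag chars go to lstr, after to lstr2
def strfloatStep (st : List Char × List Char × Bool) (i : Char) : List Char × List Char × Bool :=
  if i = '.' then (st.1, st.2.1, true)
  else if st.2.2 = false then (st.1 ++ [i], st.2.1, st.2.2)
  else (st.1, st.2.1 ++ [i], st.2.2)

def strfloat_strs (strfloat : String) : String × String :=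
  let st := strfloat.toList.foldl strfloatStep ([], [], false)
  (String.mk st.1, String.mk st.2.1)

-- ===== PORT B =====
-- head, _, tail = strfloat.partition("."); return head, tail.replace(".", "")
def strfloat_strs_alt (strfloat : String) : String × String :=
  let cs := strfloat.toList
  let head := cs.takeWhile (· ≠ '.')
  let tail := (cs.drop (head.length + 1)).filter (· ≠ '.')
  (String.mk head, String.mk tail)

-- ===== PRECONDITION & SPEC =====
def Spec_strfloat_strs (strfloat : String) (out : String × String) : Prop := out = strfloat_strs_alt strfloat
instance (strfloat : String) (out : String × String) : Decidable (Spec_strfloat_strs strfloat out) := by unfold Spec_strfloat_strs; infer_instance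

-- ===== CLAIM (what is proved, stated in full; the proofs are below) =====
def Claim_equal_strfloat_strs : Prop := ∀ (strfloat : String), Dom_strfloat_strs strfloat → Spec_strfloat_strs strfloat (strfloat_strs strfloat)

-- ===== LEMMAS AND PROOFS =====

theorem strfloatStep_true (cs : List Char) : ∀ (l1 l2 : List Char),
    cs.foldl strfloatStep (l1, l2, true) = (l1, l2 ++ cs.filter (· ≠ '.'), true) := by
  induction cs with
  | nil => simp [List.foldl]
  | cons c cs ih =>
    intro l1 l2
    by_cases h : c = '.' <;> simp [List.foldl, strfloatStep, h, ih]

theorem strfloatStep_false (cs : List Char) : ∀ (l1 l2 : List Char),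
    cs.foldl strfloatStep (l1, l2, false) =
      (l1 ++ cs.takeWhile (· ≠ '.'),
       l2 ++ ((cs.drop ((cs.takeWhile (· ≠ '.')).length + 1)).filter (· ≠ '.')),
       cs.contains '.') := by
  induction cs with
  | nil => simp [List.foldl]
  | cons c cs ih =>
    intro l1 l2
    by_cases h : c = '.'
    · simp [List.foldl, strfloatStep, h, strfloatStep_true]
    · simp [List.foldl, strfloatStep, h, ih, List.append_assoc, eq_comm]

-- ===== VERDICT (by name: the statement is the Claim_ definition above) =====
theorem strfloat_strs_spec : Claim_equal_strfloat_strs := by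
  intro s _
  unfold Spec_strfloat_strs strfloat_strs strfloat_strs_alt
  simp [strfloatStep_false]
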